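-- pv_equiv track=rewrite | github.com/domalab/ha-unraid | custom_components/unraid/api/data_processor.py | _parse_memory_info
-- ===== SOURCE A (Python) =====
-- from typing import Any, Dict, List, Optional
--
-- def _parse_memory_info(output: str) -> Dict[str, int]:
--     """Parse memory information from /proc/meminfo output."""
--     result = {
--         "total": 0,
--         "free": 0,
--         "available": 0,
--         "used": 0,
--         "cached": 0,
--         "buffers": 0,
--     }
--
--     lines = output.strip().split("\n")
--     for line in lines:
--         if ":" not in line:
--             continue
--
--         key, value = line.split(":", 1)
--         key = key.strip()
--         value_parts = value.strip().split()
--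
--         if len(value_parts) < 1:
--             continue
--
--         try:
--             value_kb = int(value_parts[0])
--
--             if key == "MemTotal":
--                 result["total"] = value_kb
--             elif key == "MemFree":
--                 result["free"] = value_kb
--             elif key == "MemAvailable":
--                 result["available"] = value_kb
--             elif key == "Cached":
--                 result["cached"] = value_kb
--             elif key == "Buffers":
--                 result["buffers"] = value_kb
--         except ValueError:
--             pass
--
--     # Calculate used memory
--     result["used"] = result["total"] - result["free"]
--
--     return result
-- ===== SOURCE B (Python) =====
-- def _parse_memory_info(output: str):
--     """Five independent back-to-front searches: for each meminfo key, scan the lines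
--     from the end and return the first parseable value (= A's last-wins)."""
--     lines = output.strip().split("\n")
--
--     def lookup(name):
--         for line in reversed(lines):
--             if ":" not in line:
--                 continue
--             key, value = line.split(":", 1)
--             if key.strip() != name:
--                 continue
--             parts = value.strip().split()
--             if not parts:
--                 continue
--             try:
--                 return int(parts[0])
--             except ValueError:
--                 continue
--         return 0
--
--     total = lookup("MemTotal")
--     free = lookup("MemFree")
--     return {
--         "total": total,
--         "free": free,
--         "available": lookup("MemAvailable"),
--         "used": total - free,
--         "cached": lookup("Cached"),
--         "buffers": lookup("Buffers"),
--     }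
-- ===== Notes on version B (the rewrite author's own statement) =====
-- stated objective: alternative
-- what changed: Replaces A's single accumulating pass with if/elif dispatch by five independent per-key searches that scan the lines back-to-front and return the first parseable value (equivalent to A's last-wins), with used computed as total minus free.
import Mathlib
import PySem

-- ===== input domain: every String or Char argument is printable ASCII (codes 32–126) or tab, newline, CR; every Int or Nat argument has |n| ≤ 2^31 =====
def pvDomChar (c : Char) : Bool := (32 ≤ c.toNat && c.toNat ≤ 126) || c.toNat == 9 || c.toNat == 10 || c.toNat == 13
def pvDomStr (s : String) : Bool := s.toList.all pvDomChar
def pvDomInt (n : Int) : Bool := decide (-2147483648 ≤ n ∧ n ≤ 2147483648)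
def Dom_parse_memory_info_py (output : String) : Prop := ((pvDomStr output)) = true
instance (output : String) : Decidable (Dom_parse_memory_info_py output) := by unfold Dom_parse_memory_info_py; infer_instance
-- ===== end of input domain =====

-- B replaces A's single accumulating if/elif pass with five independent back-to-front per-key searches (first match from the end wins = A's last-wins); alternative decomposition, same cost.


-- ===== PORT A =====
-- A's loop body: state = (total, free, available, cached, buffers); the if/elif dispatch.
def pmiA_step (st : Int × Int × Int × Int × Int) (line : String) : Int × Int × Int × Int × Int :=
  if PySem.Str.isIn ":" line then
    match PySem.Str.splitMax? line ":" 1 with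
    | some [k, v] =>
      match PySem.Chars.split₀ (PySem.Str.strip v).toList with
      | [] => st
      | p0 :: _ =>
        match PySem.Int.ofChars? p0 with
        | none => st
        | some value_kb =>
          if PySem.Str.strip k = "MemTotal" then (value_kb, st.2.1, st.2.2.1, st.2.2.2.1, st.2.2.2.2)
          else if PySem.Str.strip k = "MemFree" then (st.1, value_kb, st.2.2.1, st.2.2.2.1, st.2.2.2.2)
          else if PySem.Str.strip k = "MemAvailable" then (st.1, st.2.1, value_kb, st.2.2.2.1, st.2.2.2.2)
          else if PySem.Str.strip k = "Cached" then (st.1, st.2.1, st.2.2.1, value_kb, st.2.2.2.2)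
          else if PySem.Str.strip k = "Buffers" then (st.1, st.2.1, st.2.2.1, st.2.2.2.1, value_kb)
          else st
    | _ => st
  else st

def parse_memory_info_py (output : String) : List (String × Int) :=
  let lines := (PySem.Str.split? (PySem.Str.strip output) "\n").getD []
  let st := lines.foldl pmiA_step (0, 0, 0, 0, 0)
  [("total", st.1), ("free", st.2.1), ("available", st.2.2.1),
   ("used", st.1 - st.2.1), ("cached", st.2.2.2.1), ("buffers", st.2.2.2.2)]

-- ===== PORT B =====
-- B's lookup: walk the reversed line list, return the first parseable value for `name`, else 0.
def pmiB_lookup (name : String) : List String → Int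
  | [] => 0
  | line :: rest =>
    if PySem.Str.isIn ":" line then
      match PySem.Str.splitMax? line ":" 1 with
      | some [k, v] =>
        if PySem.Str.strip k = name then
          match PySem.Chars.split₀ (PySem.Str.strip v).toList with
          | [] => pmiB_lookup name rest
          | p0 :: _ =>
            match PySem.Int.ofChars? p0 with
            | some n => n
            | none => pmiB_lookup name rest
        else pmiB_lookup name rest
      | _ => pmiB_lookup name rest
    else pmiB_lookup name rest

def parse_memory_info_py_alt (output : String) : List (String × Int) :=
  let rlines := ((PySem.Str.split? (PySem.Str.strip output) "\n").getD []).reverse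
  let total := pmiB_lookup "MemTotal" rlines
  let free := pmiB_lookup "MemFree" rlines
  [("total", total), ("free", free), ("available", pmiB_lookup "MemAvailable" rlines),
   ("used", total - free), ("cached", pmiB_lookup "Cached" rlines), ("buffers", pmiB_lookup "Buffers" rlines)]

-- ===== PRECONDITION & SPEC =====
def Spec_parse_memory_info_py (output : String) (out : List (String × Int)) : Prop := out = parse_memory_info_py_alt output
instance (output : String) (out : List (String × Int)) : Decidable (Spec_parse_memory_info_py output out) := by unfold Spec_parse_memory_info_py; infer_instance

-- ===== CLAIM (what is proved, stated in full; the proofs are below) =====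
def Claim_equal_parse_memory_info_py : Prop := ∀ (output : String), Dom_parse_memory_info_py output → Spec_parse_memory_info_py output (parse_memory_info_py output)

-- ===== LEMMAS AND PROOFS =====
-- The value a single line contributes for key `name` (none = line ignored for that key).
def pmiVal (name line : String) : Option Int :=
  if PySem.Str.isIn ":" line then
    match PySem.Str.splitMax? line ":" 1 with
    | some [k, v] =>
      if PySem.Str.strip k = name then
        match PySem.Chars.split₀ (PySem.Str.strip v).toList with
        | [] => none
        | p0 :: _ => PySem.Int.ofChars? p0
      else none
    | _ => none
  else none

-- B's backward scan takes the first pmiVal hit.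
theorem pmiB_lookup_cons (name l : String) (ls : List String) :
    pmiB_lookup name (l :: ls) =
      match pmiVal name l with
      | some n => n
      | none => pmiB_lookup name ls := by
  rw [pmiB_lookup, pmiVal]
  split
  · cases hsp : PySem.Str.splitMax? l ":" 1 with
    | none => rfl
    | some parts =>
      match parts with
      | [] => rfl
      | [k] => rfl
      | k :: v :: x :: r => rfl
      | [k, v] =>
        simp only
        split
        · cases hp : PySem.Chars.split₀ (PySem.Str.strip v).toList with
          | nil => rfl
          | cons p0 ps => cases hi : PySem.Int.ofChars? p0 <;> rfl
        · rfl
  · rfl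

theorem pmiB_lookup_eq (name : String) (ls : List String) :
    pmiB_lookup name ls = (ls.findSome? (pmiVal name)).getD 0 := by
  induction ls with
  | nil => rfl
  | cons l ls ih =>
    rw [pmiB_lookup_cons, List.findSome?_cons]
    cases pmiVal name l <;> simp [ih]

-- A's step, written componentwise: each field is overwritten exactly by pmiVal of its key
-- (at most one of the five keys matches a given line, so the fields are independent).
theorem pmiA_step_eq (st : Int × Int × Int × Int × Int) (line : String) :
    pmiA_step st line =
      ((pmiVal "MemTotal" line).getD st.1, (pmiVal "MemFree" line).getD st.2.1,
       (pmiVal "MemAvailable" line).getD st.2.2.1, (pmiVal "Cached" line).getD st.2.2.2.1,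
       (pmiVal "Buffers" line).getD st.2.2.2.2) := by
  rw [pmiA_step]
  by_cases hc : PySem.Str.isIn ":" line = true
  · simp only [pmiVal, hc, if_true]
    cases hsp : PySem.Str.splitMax? line ":" 1 with
    | none => rfl
    | some parts =>
      match parts with
      | [] => rfl
      | [k] => rfl
      | k :: v :: x :: r => rfl
      | [k, v] =>
        simp only
        cases hp : PySem.Chars.split₀ (PySem.Str.strip v).toList with
        | nil => simp only; split_ifs <;> rfl
        | cons p0 ps =>
          cases hi : PySem.Int.ofChars? p0 with
          | none => simp only [hi]; split_ifs <;> rfl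
          | some n =>
            simp only [hi]
            by_cases e1 : PySem.Str.strip k = "MemTotal"
            · simp [e1]
            · by_cases e2 : PySem.Str.strip k = "MemFree"
              · simp [e2]
              · by_cases e3 : PySem.Str.strip k = "MemAvailable"
                · simp [e3]
                · by_cases e4 : PySem.Str.strip k = "Cached"
                  · simp [e4]
                  · by_cases e5 : PySem.Str.strip k = "Buffers"
                    · simp [e5]
                    · simp [e1, e2, e3, e4, e5]
  · simp only [pmiVal, hc, if_false, Bool.false_eq_true]
    simp

-- A's fold, projected onto one field, is B's backward first-hit search for that field's key.
theorem pmiA_proj_fold (name : String) (proj : Int × Int × Int × Int × Int → Int)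
    (h : ∀ st line, proj (pmiA_step st line) = (pmiVal name line).getD (proj st))
    (ls : List String) (st : Int × Int × Int × Int × Int) :
    proj (ls.foldl pmiA_step st) = (ls.reverse.findSome? (pmiVal name)).getD (proj st) := by
  induction ls generalizing st with
  | nil => rfl
  | cons l ls ih =>
    simp only [List.foldl_cons, List.reverse_cons, List.findSome?_append]
    rw [ih]
    cases hf : ls.reverse.findSome? (pmiVal name) with
    | some v => simp
    | none =>
      simp only [Option.none_or, List.findSome?_cons, List.findSome?_nil]
      cases hv : pmiVal name l with
      | none => simp [h, hv]
      | some n => simp [h, hv]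

-- ===== VERDICT (by name: the statement is the Claim_ definition above) =====
theorem parse_memory_info_py_spec : Claim_equal_parse_memory_info_py := by
  intro output _
  unfold Spec_parse_memory_info_py parse_memory_info_py parse_memory_info_py_alt
  simp only [pmiB_lookup_eq]
  rw [pmiA_proj_fold "MemTotal" (·.1) (fun st l => by rw [pmiA_step_eq]),
      pmiA_proj_fold "MemFree" (·.2.1) (fun st l => by rw [pmiA_step_eq]),
      pmiA_proj_fold "MemAvailable" (·.2.2.1) (fun st l => by rw [pmiA_step_eq]),
      pmiA_proj_fold "Cached" (·.2.2.2.1) (fun st l => by rw [pmiA_step_eq]),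
      pmiA_proj_fold "Buffers" (·.2.2.2.2) (fun st l => by rw [pmiA_step_eq])]
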